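-- pv_equiv track=rewrite | github.com/devsigner9920/algorithm | python/note/test.py | solution
-- ===== SOURCE A (Python) =====
-- def solution(S):
--     S = list(S)
--     results = []
--     for i in range(len(S)):
--         tmp = S.pop(i)
--         results.append(''.join(S))
--         S.insert(i, tmp)
--
--     results = sorted(results)
--     return results[0]
-- ===== SOURCE B (Python) =====
-- def solution(S):
--     # Greedy: the lexicographically smallest string after deleting one character
--     # is obtained by deleting the first character that is larger than its successor
--     # (or the last character if the string is non-decreasing).
--     i = 0
--     while i + 1 < len(S) and S[i] <= S[i + 1]:
--         i += 1
--     return S[:i] + S[i + 1:]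
-- ===== Notes on version B (the rewrite author's own statement) =====
-- stated objective: faster
-- what changed: A materialises all n deletion candidates and sorts them; B does a single greedy scan deleting the first character that exceeds its successor (or the last character), no candidate list and no sort.
import Mathlib
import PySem

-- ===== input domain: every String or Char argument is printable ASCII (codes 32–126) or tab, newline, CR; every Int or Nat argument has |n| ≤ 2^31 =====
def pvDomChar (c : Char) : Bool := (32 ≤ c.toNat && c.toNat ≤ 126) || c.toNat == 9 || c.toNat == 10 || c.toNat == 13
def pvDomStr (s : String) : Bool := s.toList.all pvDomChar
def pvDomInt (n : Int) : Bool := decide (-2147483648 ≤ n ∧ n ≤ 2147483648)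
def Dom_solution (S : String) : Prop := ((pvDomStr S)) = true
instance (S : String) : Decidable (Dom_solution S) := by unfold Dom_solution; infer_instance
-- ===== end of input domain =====

-- B replaces A's build-all-n-candidates-and-sort by a single greedy scan (delete the
-- first character larger than its successor, else the last character).

-- ===== PORT A =====
-- for i in range(len(S)): tmp = S.pop(i); results.append(''.join(S)); S.insert(i, tmp)
-- ''.join of a list of single characters is exactly String.ofList of that char list.
def solution (S : String) : String :=
  let cs := S.toList                    -- S = list(S)
  let st := (PySem.List.pyRange 0 (PySem.List.len cs) 1).foldl
    (fun (st : List Char × List String) i =>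
      match PySem.List.pop? st.1 i with
      | some (tmp, rest) => (PySem.List.insert rest i tmp, st.2 ++ [String.ofList rest])
      | none => st)                     -- unreachable: i is always in range
    (cs, [])
  let results := PySem.List.sorted st.2 (fun x => x) false
  (PySem.List.pyGet? results 0).getD "" -- results[0]; none (= IndexError, S = "") excluded by Pre_

-- ===== PORT B =====
-- the while loop: i advances while S[i] <= S[i+1]; stops at the first descent or at len(S)-1
def descIdx : List Char → Nat
  | a :: b :: t => if b < a then 0 else descIdx (b :: t) + 1
  | _ => 0

def solution_alt (S : String) : String :=
  let cs := S.toList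
  let i := descIdx cs
  -- S[:i] + S[i+1:]  (String.ofList re-packs the char list; exact)
  String.ofList (PySem.List.slice cs none (some (i : Int)) ++
                 PySem.List.slice cs (some ((i : Int) + 1)) none)

-- ===== PRECONDITION & SPEC =====
-- Pre_ excludes only the empty string, on which A raises IndexError (results[0] of an empty list).
def Pre_solution (S : String) : Prop := S ≠ ""
instance (S : String) : Decidable (Pre_solution S) := by unfold Pre_solution; infer_instance
def pvWitness_solution : String := "cba"

def Spec_solution (S : String) (out : String) : Prop := out = solution_alt S
instance (S : String) (out : String) : Decidable (Spec_solution S out) := by unfold Spec_solution; infer_instance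

-- ===== CLAIM (what is proved, stated in full; the proofs are below) =====
def Claim_equal_solution : Prop := ∀ (S : String), Dom_solution S → Pre_solution S → Spec_solution S (solution S)

-- ===== LEMMAS AND PROOFS =====

-- the greedy index is a valid deletion position
theorem descIdx_lt_length : ∀ (l : List Char), l ≠ [] → descIdx l < l.length
  | [], h => absurd rfl h
  | [_], _ => by simp [descIdx]
  | a :: b :: t, _ => by
    by_cases h : b < a
    · simp [descIdx, h]
    · have := descIdx_lt_length (b :: t) (by simp)
      simp only [descIdx, h, if_false, List.length_cons] at *
      omega

-- greedy minimality: deleting at descIdx yields the lexicographically least candidate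
theorem greedy_min : ∀ (l : List Char) (j : Nat), j < l.length → l.eraseIdx (descIdx l) ≤ l.eraseIdx j
  | [], _, hj => absurd hj (by simp)
  | [a], j, hj => by
    have : j = 0 := by simpa using hj
    subst this; simp [descIdx]
  | a :: b :: t, j, hj => by
    by_cases hab : b < a
    · cases j with
      | zero => simp [descIdx, hab]
      | succ m =>
        simp only [descIdx, hab, if_true, List.eraseIdx_cons_zero, List.eraseIdx_cons_succ]
        exact le_of_lt (List.Lex.rel hab)
    · cases j with
      | zero =>
        simp only [descIdx, hab, if_false, List.eraseIdx_cons_succ, List.eraseIdx_cons_zero]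
        rcases lt_or_eq_of_le (le_of_not_gt hab) with h | h
        · exact le_of_lt (List.Lex.rel h)
        · subst h
          have ih := greedy_min (a :: t) 0 (by simp)
          exact List.cons_le_cons a (by simpa using ih)
      | succ m =>
        have ih := greedy_min (b :: t) m (by simpa using Nat.lt_of_succ_lt_succ hj)
        simp only [descIdx, hab, if_false, List.eraseIdx_cons_succ]
        exact List.cons_le_cons a ih
termination_by l _ _ => l.length

-- popping index k and re-inserting the popped element restores the list
theorem insert_erase_restore (cs : List Char) (k : Nat) (hk : k < cs.length) :
    PySem.List.insert (cs.eraseIdx k) (k : Int) (cs[k]) = cs := by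
  rw [PySem.List.insert_natCast _ k _ (by rw [List.length_eraseIdx]; simp [hk]; omega)]
  rw [List.eraseIdx_eq_take_drop_succ]
  rw [List.take_left' (by simp [List.length_take]; omega),
      List.drop_left' (by simp [List.length_take]; omega)]
  rw [List.getElem_cons_drop hk, List.take_append_drop]

-- A's pop/append/insert loop computes the list of all deletion candidates
theorem loop_go (cs : List Char) (n : Nat) (hn : n ≤ cs.length) (acc : List String) :
    (List.map (fun (k : Nat) => (k : Int)) (List.range n)).foldl
      (fun (st : List Char × List String) i =>
        match PySem.List.pop? st.1 i with
        | some (tmp, rest) => (PySem.List.insert rest i tmp, st.2 ++ [String.ofList rest])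
        | none => st)
      (cs, acc)
    = (cs, acc ++ (List.range n).map (fun j => String.ofList (cs.eraseIdx j))) := by
  induction n generalizing acc with
  | zero => simp
  | succ k ih =>
    have hk : k < cs.length := hn
    rw [List.range_succ, List.map_append, List.foldl_append, ih (Nat.le_of_succ_le hn)]
    simp only [List.map_cons, List.map_nil, List.foldl_cons, List.foldl_nil,
      PySem.List.pop?_natCast cs k hk]
    rw [insert_erase_restore cs k hk]
    simp

theorem alt_eq_erase (S : String) :
    solution_alt S = String.ofList (S.toList.eraseIdx (descIdx S.toList)) := by
  simp only [solution_alt]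
  rw [PySem.List.slice_to_natCast]
  have h1 : ((descIdx S.toList : Int) + 1) = ((descIdx S.toList + 1 : Nat) : Int) := by push_cast; ring
  rw [h1, PySem.List.slice_from_natCast, ← List.eraseIdx_eq_take_drop_succ]

-- ===== VERDICT (by name: the statement is the Claim_ definition above) =====
theorem solution_spec : Claim_equal_solution := by
  intro S _ hS
  unfold Spec_solution
  have hcs : S.toList ≠ [] := by
    simpa [String.toList_eq_nil_iff] using hS
  simp only [solution]
  rw [PySem.List.len_eq, PySem.List.pyRange_zero_natCast,
      loop_go S.toList S.toList.length le_rfl []]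
  simp only [List.nil_append]
  cases hsorted : PySem.List.sorted
      ((List.range S.toList.length).map (fun j => String.ofList (S.toList.eraseIdx j)))
      (fun x => x) false with
  | nil =>
    rw [PySem.List.sorted_eq_nil_iff] at hsorted
    simp [List.map_eq_nil_iff, List.range_eq_nil] at hsorted
    exact absurd hsorted (by simpa [Pre_solution] using hS)
  | cons m t =>
    rw [PySem.List.pyGet?_zero_cons, Option.getD_some, alt_eq_erase]
    have hk := descIdx_lt_length S.toList hcs
    have hbmem : String.ofList (S.toList.eraseIdx (descIdx S.toList)) ∈
        (List.range S.toList.length).map (fun j => String.ofList (S.toList.eraseIdx j)) :=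
      List.mem_map.mpr ⟨_, List.mem_range.mpr hk, rfl⟩
    apply le_antisymm
    · simpa using PySem.List.key_head_sorted_le _ _ hsorted _ hbmem
    · have hm : m ∈ (List.range S.toList.length).map
          (fun j => String.ofList (S.toList.eraseIdx j)) := by
        have hmem : m ∈ PySem.List.sorted
            ((List.range S.toList.length).map (fun j => String.ofList (S.toList.eraseIdx j)))
            (fun x => x) false := by rw [hsorted]; exact List.mem_cons_self ..
        exact (PySem.List.mem_sorted _ _ _ _).mp hmem
      obtain ⟨j, hjmem, rfl⟩ := List.mem_map.mp hm
      rw [String.le_iff_toList_le, String.toList_ofList, String.toList_ofList]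
      exact greedy_min S.toList j (List.mem_range.mp hjmem)
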